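-- pv_equiv track=rewrite | github.com/getmanWhy6478/AOIS | parser/expression_parser.py | _find_op_outside_parens
-- ===== SOURCE A (Python) =====
-- def _find_op_outside_parens(text: str, op: str) -> int:
--     """Находит позицию оператора вне скобок"""
--     balance = 0
--     positions = []
--     i = 0
--
--     while i < len(text):
--         if text[i] == '(':
--             balance += 1
--         elif text[i] == ')':
--             balance -= 1
--         elif balance == 0:
--             if op == '->':
--                 if i < len(text) - 1 and text[i:i + 2] == '->':
--                     positions.append(i)
--                     i += 2
--                     continue
--             elif op == '~':
--                 if text[i] == '~':
--                     positions.append(i)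
--             elif len(op) == 1 and text[i] == op:
--                 positions.append(i)
--         i += 1
--
--     return positions[-1] if positions else -1
-- ===== SOURCE B (Python) =====
-- def _find_op_outside_parens(text: str, op: str) -> int:
--     """Depth-prefix pass, then scan from the right and return the first match."""
--     depth = []
--     d = 0
--     for ch in text:
--         depth.append(d)
--         if ch == '(':
--             d += 1
--         elif ch == ')':
--             d -= 1
--     for i in range(len(text) - 1, -1, -1):
--         ch = text[i]
--         if depth[i] != 0 or ch == '(' or ch == ')':
--             continue
--         if op == '->':
--             if text[i:i + 2] == '->':
--                 return i
--         elif op == '~':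
--             if ch == '~':
--                 return i
--         elif len(op) == 1 and ch == op:
--             return i
--     return -1
-- ===== Notes on version B (the rewrite author's own statement) =====
-- stated objective: alternative
-- what changed: Replaces A's single stateful while-loop (running balance, growing positions list, manual i+=2 skip after '->') by two passes: a precomputed depth-prefix list, then a right-to-left scan that returns the first match immediately, so no positions list and no index skipping are needed.
import Mathlib
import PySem

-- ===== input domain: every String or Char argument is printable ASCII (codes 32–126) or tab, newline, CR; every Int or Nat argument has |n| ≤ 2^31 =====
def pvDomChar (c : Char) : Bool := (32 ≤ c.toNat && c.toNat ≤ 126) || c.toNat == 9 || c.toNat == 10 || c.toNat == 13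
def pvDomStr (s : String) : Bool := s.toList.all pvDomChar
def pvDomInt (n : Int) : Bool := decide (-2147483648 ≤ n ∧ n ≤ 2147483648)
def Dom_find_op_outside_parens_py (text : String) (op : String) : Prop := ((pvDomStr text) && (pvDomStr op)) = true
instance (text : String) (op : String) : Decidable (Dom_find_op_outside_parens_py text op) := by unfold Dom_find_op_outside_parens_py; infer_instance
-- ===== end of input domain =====

-- B replaces A's single stateful while-loop (balance + positions list + manual i+=2 skip) by a
-- precomputed depth-prefix list plus a right-to-left scan returning the first match (alternative decomposition).

-- ===== PORT A =====
-- A's while-loop: index i, running balance, accumulated positions list; text[i:i+2]=='->' is ported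
-- as (cs.drop i).take 2 = ['-','>'] (exact for the nonnegative in-loop index i).
def goA (cs : List Char) (op : String) (i : Nat) (balance : Int) (positions : List Nat) : List Nat :=
  if h : i < cs.length then
    let c := cs[i]
    if c = '(' then goA cs op (i+1) (balance+1) positions
    else if c = ')' then goA cs op (i+1) (balance-1) positions
    else if balance = 0 then
      if op = "->" then
        if (i : Int) < (cs.length : Int) - 1 ∧ (cs.drop i).take 2 = ['-', '>'] then
          goA cs op (i+2) balance (positions ++ [i])
        else goA cs op (i+1) balance positions
      else if op = "~" then
        if c = '~' then goA cs op (i+1) balance (positions ++ [i])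
        else goA cs op (i+1) balance positions
      else if op.toList.length = 1 ∧ [c] = op.toList then
        goA cs op (i+1) balance (positions ++ [i])
      else goA cs op (i+1) balance positions
    else goA cs op (i+1) balance positions
  else positions
termination_by cs.length - i

-- positions[-1] if positions else -1
def find_op_outside_parens_py (text : String) (op : String) : Int :=
  match (goA text.toList op 0 0 []).getLast? with
  | some j => (j : Int)
  | none => -1

-- ===== PORT B =====
-- first pass of Source B: depth[i] = paren balance of text[:i]
def depthList (cs : List Char) : List Int :=
  (cs.foldl (fun (st : List Int × Int) ch =>
      (st.1 ++ [st.2],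
       if ch = '(' then st.2 + 1 else if ch = ')' then st.2 - 1 else st.2))
    ([], 0)).1

-- second pass of Source B: scan indices i-1, i-2, …, 0; return the first match, else -1
def goB (cs : List Char) (depth : List Int) (op : String) : Nat → Int
  | 0 => -1
  | j + 1 =>
    let c := cs.getD j ' '
    if depth.getD j 0 ≠ 0 ∨ c = '(' ∨ c = ')' then goB cs depth op j
    else if op = "->" then
      (if (cs.drop j).take 2 = ['-', '>'] then (j : Int) else goB cs depth op j)
    else if op = "~" then
      (if c = '~' then (j : Int) else goB cs depth op j)
    else if op.toList.length = 1 ∧ [c] = op.toList then (j : Int)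
    else goB cs depth op j

def find_op_outside_parens_py_alt (text : String) (op : String) : Int :=
  let cs := text.toList
  goB cs (depthList cs) op cs.length

-- ===== PRECONDITION & SPEC =====
def Spec_find_op_outside_parens_py (text : String) (op : String) (out : Int) : Prop := out = find_op_outside_parens_py_alt text op
instance (text : String) (op : String) (out : Int) : Decidable (Spec_find_op_outside_parens_py text op out) := by unfold Spec_find_op_outside_parens_py; infer_instance

-- ===== CLAIM (what is proved, stated in full; the proofs are below) =====
def Claim_equal_find_op_outside_parens_py : Prop := ∀ (text : String) (op : String), Dom_find_op_outside_parens_py text op → Spec_find_op_outside_parens_py text op (find_op_outside_parens_py text op)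

-- ===== LEMMAS AND PROOFS =====

-- paren balance of the first i characters
def balAt (cs : List Char) (i : Nat) : Int :=
  (cs.take i).foldl (fun d ch => if ch = '(' then d + 1 else if ch = ')' then d - 1 else d) 0

-- does position j carry op, outside parentheses?
def isMatch (cs : List Char) (op : String) (j : Nat) : Bool :=
  (balAt cs j == 0) && !(cs.getD j ' ' == '(') && !(cs.getD j ' ' == ')') &&
    (if op = "->" then decide ((cs.drop j).take 2 = ['-', '>'])
     else if op = "~" then cs.getD j ' ' == '~'
     else decide (op.toList.length = 1 ∧ [cs.getD j ' '] = op.toList))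

lemma isMatch_eq (cs : List Char) (op : String) (j : Nat) (hj : j < cs.length) :
    isMatch cs op j =
      ((balAt cs j == 0) && !(cs[j] == '(') && !(cs[j] == ')') &&
        (if op = "->" then decide ((cs.drop j).take 2 = ['-', '>'])
         else if op = "~" then cs[j] == '~'
         else decide (op.toList.length = 1 ∧ [cs[j]] = op.toList))) := by
  unfold isMatch
  rw [List.getD_eq_getElem cs ' ' hj]

lemma balAt_succ (cs : List Char) (j : Nat) (h : j < cs.length) :
    balAt cs (j+1) =
      (if cs[j] = '(' then balAt cs j + 1 else if cs[j] = ')' then balAt cs j - 1 else balAt cs j) := by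
  unfold balAt
  rw [List.take_succ_eq_append_getElem h, List.foldl_append]
  rfl

lemma balAt_append_of_le (cs l : List Char) (j : Nat) (h : j ≤ cs.length) :
    balAt (cs ++ l) j = balAt cs j := by
  simp [balAt, List.take_append_of_le_length h]

lemma depth_fold (cs : List Char) :
    cs.foldl (fun (st : List Int × Int) ch =>
        (st.1 ++ [st.2],
         if ch = '(' then st.2 + 1 else if ch = ')' then st.2 - 1 else st.2)) ([], 0)
      = ((List.range cs.length).map (fun j => balAt cs j), balAt cs cs.length) := by
  induction cs using List.reverseRecOn with
  | nil => simp [balAt]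
  | append_singleton cs c ih =>
    rw [List.foldl_append, ih]
    have hlen : (cs ++ [c]).length = cs.length + 1 := by simp
    have hget : (cs ++ [c])[cs.length]'(by simp) = c := by simp
    have hmap : (List.range cs.length).map (fun j => balAt (cs ++ [c]) j)
        = (List.range cs.length).map (fun j => balAt cs j) := by
      apply List.map_congr_left
      intro j hj
      exact balAt_append_of_le cs [c] j (le_of_lt (List.mem_range.mp hj))
    have hbal : balAt (cs ++ [c]) cs.length = balAt cs cs.length :=
      balAt_append_of_le cs [c] cs.length le_rfl
    have hbal1 : balAt (cs ++ [c]) (cs.length + 1) =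
        (if c = '(' then balAt cs cs.length + 1
         else if c = ')' then balAt cs cs.length - 1 else balAt cs cs.length) := by
      have := balAt_succ (cs ++ [c]) cs.length (by simp)
      rw [hget, hbal] at this
      exact this
    simp only [hlen, List.range_succ, List.map_append, List.map_cons, List.map_nil, hmap, hbal, hbal1]
    simp

lemma depthList_getD (cs : List Char) (j : Nat) (h : j < cs.length) :
    (depthList cs).getD j 0 = balAt cs j := by
  rw [depthList, depth_fold]
  simp [List.getD_eq_getElem?_getD, h]

lemma take2_bound (cs : List Char) (j : Nat) (h : (cs.drop j).take 2 = ['-', '>']) :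
    (j : Int) < (cs.length : Int) - 1 := by
  have := congrArg List.length h
  simp at this
  omega

lemma take2_chars (cs : List Char) (j : Nat) (hj : j < cs.length) (hj1 : j + 1 < cs.length)
    (h : (cs.drop j).take 2 = ['-', '>']) : cs[j] = '-' ∧ cs[j+1] = '>' := by
  rw [List.drop_eq_getElem_cons hj, List.drop_eq_getElem_cons hj1] at h
  have e : List.take 2 (cs[j] :: cs[j+1] :: cs.drop (j+1+1)) = [cs[j], cs[j+1]] := rfl
  rw [e] at h
  simp only [List.cons.injEq, and_true] at h
  exact h

lemma goA_spec (cs : List Char) (op : String) :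
    ∀ n i balance ps, cs.length - i ≤ n → balance = balAt cs i →
    goA cs op i balance ps = ps ++ ((List.range' i (cs.length - i)).filter (isMatch cs op)) := by
  intro n
  induction n with
  | zero =>
    intro i b ps hn hb
    have h : ¬ i < cs.length := by omega
    rw [goA]
    simp only [dif_neg h]
    have : cs.length - i = 0 := by omega
    simp [this]
  | succ n ih =>
    intro i b ps hn hb
    by_cases h : i < cs.length
    · have hrange : List.range' i (cs.length - i) = i :: List.range' (i+1) (cs.length - (i+1)) := by
        have he : cs.length - i = (cs.length - (i+1)) + 1 := by omega
        rw [he, List.range'_succ]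
      rw [goA]
      simp only [dif_pos h]
      by_cases hc1 : cs[i] = '('
      · have hm : isMatch cs op i = false := by
          rw [isMatch_eq cs op i h]; simp [hc1]
        rw [if_pos hc1, ih (i+1) _ ps (by omega)
            (by rw [hb, balAt_succ cs i h, if_pos hc1]), hrange, List.filter_cons, hm]
        simp
      · rw [if_neg hc1]
        by_cases hc2 : cs[i] = ')'
        · have hm : isMatch cs op i = false := by
            rw [isMatch_eq cs op i h]; simp [hc2]
          rw [if_pos hc2, ih (i+1) _ ps (by omega)
              (by rw [hb, balAt_succ cs i h, if_neg hc1, if_pos hc2]), hrange, List.filter_cons, hm]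
          simp
        · rw [if_neg hc2]
          have hbstep : balAt cs (i+1) = balAt cs i := by
            rw [balAt_succ cs i h, if_neg hc1, if_neg hc2]
          by_cases hb0 : b = 0
          · have hbal0 : balAt cs i = 0 := by rw [← hb, hb0]
            rw [if_pos hb0]
            by_cases hop : op = "->"
            · rw [if_pos hop]
              by_cases hcond : (i : Int) < (cs.length : Int) - 1 ∧ (cs.drop i).take 2 = ['-', '>']
              · obtain ⟨hlt, hdt⟩ := hcond
                have hj1 : i + 1 < cs.length := by omega
                obtain ⟨hci, hci1⟩ := take2_chars cs i h hj1 hdt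
                have hm : isMatch cs op i = true := by
                  rw [isMatch_eq cs op i h]; simp [hci, hop, hbal0, hdt]
                have hm1 : isMatch cs op (i+1) = false := by
                  rw [isMatch_eq cs op (i+1) hj1]
                  simp only [hop]
                  rw [List.drop_eq_getElem_cons hj1, hci1]
                  simp
                have hbal2 : balAt cs (i+2) = 0 := by
                  have e1 : balAt cs (i+2) = balAt cs (i+1) := by
                    rw [balAt_succ cs (i+1) hj1, hci1]; simp
                  rw [e1, hbstep, hbal0]
                have hrange2 : List.range' i (cs.length - i)
                    = i :: (i+1) :: List.range' (i+2) (cs.length - (i+2)) := by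
                  have he : cs.length - i = ((cs.length - (i+2)) + 1) + 1 := by omega
                  rw [he, List.range'_succ, List.range'_succ]
                rw [if_pos ⟨hlt, hdt⟩,
                    ih (i+2) b (ps ++ [i]) (by omega) (by rw [hb0, hbal2]),
                    hrange2, List.filter_cons, List.filter_cons, hm, hm1]
                simp
              · have hdt : ¬ (cs.drop i).take 2 = ['-', '>'] := by
                  intro hx; exact hcond ⟨take2_bound cs i hx, hx⟩
                have hm : isMatch cs op i = false := by
                  rw [isMatch_eq cs op i h]
                  simp only [hop]
                  simp [hdt]
                rw [if_neg hcond, ih (i+1) b ps (by omega) (by rw [hb, hbstep]),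
                    hrange, List.filter_cons, hm]
                simp
            · rw [if_neg hop]
              by_cases hop2 : op = "~"
              · rw [if_pos hop2]
                by_cases hc : cs[i] = '~'
                · have hm : isMatch cs op i = true := by
                    rw [isMatch_eq cs op i h]; simp [hc, hop2, hbal0]
                  rw [if_pos hc, ih (i+1) b (ps ++ [i]) (by omega) (by rw [hb, hbstep]),
                      hrange, List.filter_cons, hm]
                  simp
                · have hm : isMatch cs op i = false := by
                    rw [isMatch_eq cs op i h]; simp [hc, hop2]
                  rw [if_neg hc, ih (i+1) b ps (by omega) (by rw [hb, hbstep]),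
                      hrange, List.filter_cons, hm]
                  simp
              · rw [if_neg hop2]
                by_cases hc : op.toList.length = 1 ∧ [cs[i]] = op.toList
                · have hm : isMatch cs op i = true := by
                    rw [isMatch_eq cs op i h]
                    simp only [String.length_toList] at hc
                    simp [String.length_toList, hop, hop2, hbal0, hc.1, hc.2, hc1, hc2]
                  rw [if_pos hc, ih (i+1) b (ps ++ [i]) (by omega) (by rw [hb, hbstep]),
                      hrange, List.filter_cons, hm]
                  simp
                · have hm : isMatch cs op i = false := by
                    rw [isMatch_eq cs op i h]
                    simp only [String.length_toList] at hc
                    simp only [if_neg hop, if_neg hop2]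
                    simp [String.length_toList]
                    tauto
                  rw [if_neg hc, ih (i+1) b ps (by omega) (by rw [hb, hbstep]),
                      hrange, List.filter_cons, hm]
                  simp
          · have hm : isMatch cs op i = false := by
              have hne : ¬ balAt cs i = 0 := by rw [← hb]; exact hb0
              rw [isMatch_eq cs op i h]; simp [hne]
            rw [if_neg hb0, ih (i+1) b ps (by omega) (by rw [hb, hbstep]),
                hrange, List.filter_cons, hm]
            simp
    · rw [goA]
      simp only [dif_neg h]
      have : cs.length - i = 0 := by omega
      simp [this]

lemma goB_spec (cs : List Char) (op : String) :
    ∀ i, i ≤ cs.length →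
    goB cs (depthList cs) op i =
      (match ((List.range' 0 i).filter (isMatch cs op)).getLast? with
       | some j => (j : Int) | none => -1) := by
  intro i
  induction i with
  | zero => intro _; simp [goB]
  | succ j ih =>
    intro h
    have hj : j < cs.length := by omega
    have hget : cs.getD j ' ' = cs[j] := List.getD_eq_getElem cs ' ' hj
    have hd : (depthList cs).getD j 0 = balAt cs j := depthList_getD cs j hj
    have hrange : List.range' 0 (j+1) = List.range' 0 j ++ [j] := by
      simpa using List.range'_1_concat (s := 0) (n := j)
    have hsplit : ∀ m : Bool, isMatch cs op j = m →
        (List.range' 0 (j+1)).filter (isMatch cs op)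
          = (List.range' 0 j).filter (isMatch cs op) ++ (if m then [j] else []) := by
      intro m hm
      rw [hrange, List.filter_append, List.filter_singleton, hm]
      cases m <;> simp
    rw [goB]
    by_cases h1 : (depthList cs).getD j 0 ≠ 0 ∨ cs.getD j ' ' = '(' ∨ cs.getD j ' ' = ')'
    · have hm : isMatch cs op j = false := by
        rw [isMatch_eq cs op j hj]
        rcases h1 with h1 | h1 | h1
        · rw [hd] at h1; simp [h1]
        · rw [hget] at h1; simp [h1]
        · rw [hget] at h1; simp [h1]
      rw [if_pos h1, ih (by omega), hsplit false hm]
      simp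
    · have h1' := h1
      rw [not_or, not_or, not_not, hd, hget] at h1'
      obtain ⟨hd0, hcp, hcq⟩ := h1'
      rw [if_neg h1]
      by_cases hop : op = "->"
      · rw [if_pos hop]
        by_cases hdt : (cs.drop j).take 2 = ['-', '>']
        · have hm : isMatch cs op j = true := by
            rw [isMatch_eq cs op j hj]; simp [hop, hd0, hdt, hcp, hcq]
          rw [if_pos hdt, hsplit true hm]
          simp
        · have hm : isMatch cs op j = false := by
            rw [isMatch_eq cs op j hj]; simp [hop, hdt]
          rw [if_neg hdt, ih (by omega), hsplit false hm]
          simp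
      · rw [if_neg hop]
        by_cases hop2 : op = "~"
        · rw [if_pos hop2]
          by_cases hc : cs.getD j ' ' = '~'
          · rw [if_pos hc]
            rw [hget] at hc
            have hm : isMatch cs op j = true := by
              rw [isMatch_eq cs op j hj]; simp [hop2, hd0, hc]
            rw [hsplit true hm]
            simp
          · rw [if_neg hc]
            rw [hget] at hc
            have hm : isMatch cs op j = false := by
              rw [isMatch_eq cs op j hj]; simp [hop2, hc]
            rw [ih (by omega), hsplit false hm]
            simp
        · rw [if_neg hop2]
          by_cases hc : op.toList.length = 1 ∧ [cs.getD j ' '] = op.toList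
          · rw [if_pos hc]
            rw [hget] at hc
            have hm : isMatch cs op j = true := by
              rw [isMatch_eq cs op j hj]
              simp only [String.length_toList] at hc
              simp [String.length_toList, hop, hop2, hd0, hc.1, hc.2, hcp, hcq]
            rw [hsplit true hm]
            simp
          · rw [if_neg hc]
            rw [hget] at hc
            have hm : isMatch cs op j = false := by
              rw [isMatch_eq cs op j hj]
              simp only [String.length_toList] at hc
              simp only [if_neg hop, if_neg hop2]
              simp [String.length_toList]
              tauto
            rw [ih (by omega), hsplit false hm]
            simp

theorem find_op_outside_parens_py_spec : Claim_equal_find_op_outside_parens_py := by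
  intro text op _
  unfold Spec_find_op_outside_parens_py find_op_outside_parens_py find_op_outside_parens_py_alt
  rw [goA_spec text.toList op text.toList.length 0 0 [] (by omega) rfl,
      goB_spec text.toList op text.toList.length le_rfl]
  simp only [List.nil_append, Nat.sub_zero]
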